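-- pv_equiv track=rewrite | github.com/SantiRR31/proyectoC | informes/inf_real_egre.py | obtener_totales_especiales
-- ===== SOURCE A (Python) =====
-- def obtener_totales_especiales(partidas_por_grupo):
--     total_120 = None
--     total_330 = None
--
--     # Buscar 120 en grupo 100
--     if 100 in partidas_por_grupo:
--         for codigo, total in partidas_por_grupo[100]:
--             if codigo == 120:
--                 total_120 = total
--
--     # Buscar 330 en grupo 330
--     if 330 in partidas_por_grupo:
--         for codigo, total in partidas_por_grupo[330]:
--             if codigo == 330:
--                 total_330 = total
--
--     # Si no se encontró en los grupos esperados, buscar globalmente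
--     if total_120 is None:
--         for partidas in partidas_por_grupo.values():
--             for codigo, total in partidas:
--                 if codigo == 120:
--                     total_120 = total
--
--     if total_330 is None:
--         for partidas in partidas_por_grupo.values():
--             for codigo, total in partidas:
--                 if codigo == 330:
--                     total_330 = total
--
--     return total_120, total_330
-- ===== SOURCE B (Python) =====
-- def obtener_totales_especiales(partidas_por_grupo):
--     # Build an index of the last-seen total per codigo in one pass over all groups.
--     ultimo = {}
--     for partidas in partidas_por_grupo.values():
--         for codigo, total in partidas:
--             ultimo[codigo] = total
--
--     # Preferred groups: last matching entry, or None.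
--     grupo_120 = None
--     for codigo, total in partidas_por_grupo.get(100, []):
--         if codigo == 120:
--             grupo_120 = total
--
--     grupo_330 = None
--     for codigo, total in partidas_por_grupo.get(330, []):
--         if codigo == 330:
--             grupo_330 = total
--
--     total_120 = grupo_120 if grupo_120 is not None else ultimo.get(120)
--     total_330 = grupo_330 if grupo_330 is not None else ultimo.get(330)
--     return total_120, total_330
-- ===== Notes on version B (the rewrite author's own statement) =====
-- stated objective: alternative
-- what changed: B replaces A's two conditional global fallback loops by a single pass that builds a last-seen-total index over all groups first, then combines the preferred-group scans with dictionary lookups.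
import Mathlib
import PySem

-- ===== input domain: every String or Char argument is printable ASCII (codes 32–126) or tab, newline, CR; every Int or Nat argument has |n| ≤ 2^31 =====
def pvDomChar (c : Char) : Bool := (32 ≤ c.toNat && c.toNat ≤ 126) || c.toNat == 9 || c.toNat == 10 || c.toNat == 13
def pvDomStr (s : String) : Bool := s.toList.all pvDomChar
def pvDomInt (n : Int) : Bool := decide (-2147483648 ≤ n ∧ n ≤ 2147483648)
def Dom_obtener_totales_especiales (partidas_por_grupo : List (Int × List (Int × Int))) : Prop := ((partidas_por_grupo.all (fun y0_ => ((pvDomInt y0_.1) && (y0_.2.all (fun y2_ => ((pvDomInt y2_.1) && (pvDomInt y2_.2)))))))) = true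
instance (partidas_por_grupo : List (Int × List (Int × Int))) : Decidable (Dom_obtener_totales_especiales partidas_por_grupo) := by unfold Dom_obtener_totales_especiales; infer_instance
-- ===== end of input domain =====

-- B builds a last-seen-total index over all groups in one pass, then combines the
-- preferred-group scans with dictionary lookups (alternative decomposition of A's
-- two conditional global fallback loops).


-- ===== PORT A =====
def obtener_totales_especiales (partidas_por_grupo : List (Int × List (Int × Int))) : Option Int × Option Int :=
  let d := PySem.Dict.mk partidas_por_grupo
  let total_120 : Option Int := none
  let total_330 : Option Int := none
  -- if 100 in partidas_por_grupo: for codigo, total in partidas_por_grupo[100]: …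
  let total_120 :=
    match (d.get? 100 : Option (List (Int × Int))) with
    | some ps => ps.foldl (fun (t : Option Int) (p : Int × Int) => if p.1 = 120 then some p.2 else t) total_120
    | none => total_120
  -- if 330 in partidas_por_grupo: for codigo, total in partidas_por_grupo[330]: …
  let total_330 :=
    match (d.get? 330 : Option (List (Int × Int))) with
    | some ps => ps.foldl (fun (t : Option Int) (p : Int × Int) => if p.1 = 330 then some p.2 else t) total_330
    | none => total_330
  -- if total_120 is None: global scan over values()
  let total_120 :=
    match total_120 with
    | none => d.values.foldl (fun (t : Option Int) (ps : List (Int × Int)) => ps.foldl (fun (t : Option Int) (p : Int × Int) => if p.1 = 120 then some p.2 else t) t) none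
    | some v => some v
  -- if total_330 is None: global scan over values()
  let total_330 :=
    match total_330 with
    | none => d.values.foldl (fun (t : Option Int) (ps : List (Int × Int)) => ps.foldl (fun (t : Option Int) (p : Int × Int) => if p.1 = 330 then some p.2 else t) t) none
    | some v => some v
  (total_120, total_330)

-- ===== PORT B =====
def obtener_totales_especiales_alt (partidas_por_grupo : List (Int × List (Int × Int))) : Option Int × Option Int :=
  let d := PySem.Dict.mk partidas_por_grupo
  -- ultimo = {}; for partidas in values(): for codigo, total: ultimo[codigo] = total
  let ultimo : PySem.Dict Int Int :=
    d.values.foldl (fun (u : PySem.Dict Int Int) (ps : List (Int × Int)) => ps.foldl (fun (u : PySem.Dict Int Int) (p : Int × Int) => u.insert p.1 p.2) u) PySem.Dict.empty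
  -- preferred-group scans (d.get(k, []))
  let grupo_120 :=
    ((d.get? 100).getD []).foldl (fun (t : Option Int) (p : Int × Int) => if p.1 = 120 then some p.2 else t) (none : Option Int)
  let grupo_330 :=
    ((d.get? 330).getD []).foldl (fun (t : Option Int) (p : Int × Int) => if p.1 = 330 then some p.2 else t) (none : Option Int)
  let total_120 := match grupo_120 with | some v => some v | none => ultimo.get? 120
  let total_330 := match grupo_330 with | some v => some v | none => ultimo.get? 330
  (total_120, total_330)

-- ===== PRECONDITION & SPEC =====
def Spec_obtener_totales_especiales (partidas_por_grupo : List (Int × List (Int × Int))) (out : Option Int × Option Int) : Prop := out = obtener_totales_especiales_alt partidas_por_grupo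
instance (partidas_por_grupo : List (Int × List (Int × Int))) (out : Option Int × Option Int) : Decidable (Spec_obtener_totales_especiales partidas_por_grupo out) := by unfold Spec_obtener_totales_especiales; infer_instance

-- ===== CLAIM (what is proved, stated in full; the proofs are below) =====
def Claim_equal_obtener_totales_especiales : Prop := ∀ (partidas_por_grupo : List (Int × List (Int × Int))), Dom_obtener_totales_especiales partidas_por_grupo → Spec_obtener_totales_especiales partidas_por_grupo (obtener_totales_especiales partidas_por_grupo)

-- ===== LEMMAS AND PROOFS =====

-- lookup in a dict built by inserting all pairs of ps = last-match fold over ps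
theorem get?_foldl_insert (c : Int) (ps : List (Int × Int)) (u : PySem.Dict Int Int) :
    (ps.foldl (fun (u : PySem.Dict Int Int) (p : Int × Int) => u.insert p.1 p.2) u).get? c
      = ps.foldl (fun (t : Option Int) (p : Int × Int) => if p.1 = c then some p.2 else t) (u.get? c) := by
  induction ps generalizing u with
  | nil => rfl
  | cons p ps ih =>
    simp only [List.foldl_cons, ih, PySem.Dict.get?_insert]
    by_cases h : p.1 = c
    · simp [h]
    · simp [h, Ne.symm h]

theorem get?_global (c : Int) (vs : List (List (Int × Int))) (u : PySem.Dict Int Int) :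
    (vs.foldl (fun (u : PySem.Dict Int Int) (ps : List (Int × Int)) => ps.foldl (fun (u : PySem.Dict Int Int) (p : Int × Int) => u.insert p.1 p.2) u) u).get? c
      = vs.foldl (fun (t : Option Int) (ps : List (Int × Int)) => ps.foldl (fun (t : Option Int) (p : Int × Int) => if p.1 = c then some p.2 else t) t) (u.get? c) := by
  induction vs generalizing u with
  | nil => rfl
  | cons ps vs ih =>
    simp only [List.foldl_cons, ih, get?_foldl_insert]

theorem side_eq (g c : Int) (d : PySem.Dict Int (List (Int × Int))) :
    (match
        (match (d.get? g : Option (List (Int × Int))) with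
          | some ps => ps.foldl (fun (t : Option Int) (p : Int × Int) => if p.1 = c then some p.2 else t) (none : Option Int)
          | none => none) with
      | none => d.values.foldl (fun (t : Option Int) (ps : List (Int × Int)) => ps.foldl (fun (t : Option Int) (p : Int × Int) => if p.1 = c then some p.2 else t) t) none
      | some v => some v)
      = (match ((d.get? g).getD []).foldl (fun (t : Option Int) (p : Int × Int) => if p.1 = c then some p.2 else t) (none : Option Int) with
          | some v => some v
          | none => (d.values.foldl (fun (u : PySem.Dict Int Int) (ps : List (Int × Int)) => ps.foldl (fun (u : PySem.Dict Int Int) (p : Int × Int) => u.insert p.1 p.2) u) PySem.Dict.empty).get? c) := by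
  rw [get?_global]
  cases h : d.get? g with
  | none => simp [PySem.Dict.get?_empty]
  | some ps =>
    simp only [Option.getD_some]
    cases hf : ps.foldl (fun (t : Option Int) (p : Int × Int) => if p.1 = c then some p.2 else t) (none : Option Int) with
    | none => simp [PySem.Dict.get?_empty]
    | some v => simp

-- ===== VERDICT (by name: the statement is the Claim_ definition above) =====
theorem obtener_totales_especiales_spec : Claim_equal_obtener_totales_especiales := by
  intro d _
  show _ = _
  unfold obtener_totales_especiales obtener_totales_especiales_alt
  simp only []
  refine Prod.ext ?_ ?_
  · exact side_eq 100 120 (PySem.Dict.mk d)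
  · exact side_eq 330 330 (PySem.Dict.mk d)
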